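-- pv_equiv track=rewrite | github.com/cynimon/beg-projects | 03. Генератор безопасных паролей.py | char_getting
-- ===== SOURCE A (Python) =====
-- digits = '0123456789'
--
-- lowercase = 'abcdefghijklmnopqrstuvwxyz'
--
-- uppercase = 'ABCDEFGHIJKLMNOPQRSTUVWXYZ'
--
-- symb = '!#$%&*+-=?@^_'
--
-- nones = 'il1Lo0O'
--
-- def char_getting(chars, digf, upperf, lowerf, symbf, nonesf):
--     if symbf == True:
--             chars += symb
--     if nonesf == False:
--         if digf == True:
--             chars += digits
--         if upperf == True:
--             chars += uppercase
--         if lowerf == True: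
--             chars += lowercase
-- # без неоднозначных символов
--     if nonesf == True:
--         if digf == True:
--             for c in digits:
--                 if c not in '10':
--                     chars += c
--         if upperf == True:
--             for c in uppercase:
--                 if c not in nones:
--                     chars += c
--         if lowerf == True:
--             for c in lowercase:
--                 if c not in nones:
--                     chars += c
--     return chars
-- ===== SOURCE B (Python) =====
-- digits = '0123456789'
-- lowercase = 'abcdefghijklmnopqrstuvwxyz'
-- uppercase = 'ABCDEFGHIJKLMNOPQRSTUVWXYZ'
-- symb = '!#$%&*+-=?@^_'
-- nones = 'il1Lo0O'
--
-- # Precomputed unambiguous alphabets (the originals with the ambiguous chars removed).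
-- SAFE_DIGITS = '23456789'
-- SAFE_UPPER = 'ABCDEFGHIJKMNPQRSTUVWXYZ'
-- SAFE_LOWER = 'abcdefghjkmnpqrstuvwxyz'
--
-- def char_getting(chars, digf, upperf, lowerf, symbf, nonesf):
--     if symbf == True:
--         chars += symb
--     if nonesf == False:
--         pools = (digits, uppercase, lowercase)
--     elif nonesf == True:
--         pools = (SAFE_DIGITS, SAFE_UPPER, SAFE_LOWER)
--     else:
--         pools = ('', '', '')
--     for flag, pool in zip((digf, upperf, lowerf), pools):
--         if flag == True:
--             chars += pool
--     return chars
-- ===== Notes on version B (the rewrite author's own statement) =====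
-- stated objective: simpler
-- what changed: A's two mirrored nonesf branches with per-character filter loops are replaced by precomputed unambiguous-alphabet constants, a single pool-triple selection, and one table-driven pass over (flag, pool) pairs.
import Mathlib
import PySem

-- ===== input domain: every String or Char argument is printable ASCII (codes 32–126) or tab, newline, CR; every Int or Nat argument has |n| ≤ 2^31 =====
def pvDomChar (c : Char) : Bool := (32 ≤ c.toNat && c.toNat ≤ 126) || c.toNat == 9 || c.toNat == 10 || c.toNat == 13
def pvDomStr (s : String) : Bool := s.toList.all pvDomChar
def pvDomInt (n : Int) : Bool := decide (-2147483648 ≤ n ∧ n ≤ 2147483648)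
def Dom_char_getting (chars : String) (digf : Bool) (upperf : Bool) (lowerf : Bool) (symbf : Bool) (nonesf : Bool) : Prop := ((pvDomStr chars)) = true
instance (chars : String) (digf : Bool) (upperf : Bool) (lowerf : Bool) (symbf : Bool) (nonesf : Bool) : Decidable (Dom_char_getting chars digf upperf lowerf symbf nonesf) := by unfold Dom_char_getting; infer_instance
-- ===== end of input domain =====

-- ===== PORT A =====
-- Header: B collapses A's mirrored nonesf branches with per-char filter loops into a
-- pool-selection plus one table-driven pass over precomputed constants (objective: simpler).
def pvDigits : List Char := "0123456789".toList
def pvLowercase : List Char := "abcdefghijklmnopqrstuvwxyz".toList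
def pvUppercase : List Char := "ABCDEFGHIJKLMNOPQRSTUVWXYZ".toList
def pvSymb : List Char := "!#$%&*+-=?@^_".toList
def pvNones : List Char := "il1Lo0O".toList

-- literal transliteration of A over List Char ('c not in s' for a single char is the
-- membership test c ∈ s.toList — exact, since the needle is one character)
def char_getting (chars : String) (digf : Bool) (upperf : Bool) (lowerf : Bool) (symbf : Bool) (nonesf : Bool) : String :=
  let cs := chars.toList
  let cs := if symbf == true then cs ++ pvSymb else cs
  let cs :=
    if nonesf == false then
      let cs := if digf == true then cs ++ pvDigits else cs
      let cs := if upperf == true then cs ++ pvUppercase else cs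
      let cs := if lowerf == true then cs ++ pvLowercase else cs
      cs
    else cs
  let cs :=
    if nonesf == true then
      let cs := if digf == true then
          pvDigits.foldl (fun acc c => if !("10".toList.contains c) then acc ++ [c] else acc) cs
        else cs
      let cs := if upperf == true then
          pvUppercase.foldl (fun acc c => if !(pvNones.contains c) then acc ++ [c] else acc) cs
        else cs
      let cs := if lowerf == true then
          pvLowercase.foldl (fun acc c => if !(pvNones.contains c) then acc ++ [c] else acc) cs
        else cs
      cs
    else cs
  String.ofList cs

-- ===== PORT B =====
def pvSafeDigits : List Char := "23456789".toList
def pvSafeUpper : List Char := "ABCDEFGHIJKMNPQRSTUVWXYZ".toList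
def pvSafeLower : List Char := "abcdefghjkmnpqrstuvwxyz".toList

-- literal transliteration of B: select the pool triple, then one table-driven pass
def char_getting_alt (chars : String) (digf : Bool) (upperf : Bool) (lowerf : Bool) (symbf : Bool) (nonesf : Bool) : String :=
  let cs := chars.toList
  let cs := if symbf == true then cs ++ pvSymb else cs
  let pools :=
    if nonesf == false then (pvDigits, pvUppercase, pvLowercase)
    else if nonesf == true then (pvSafeDigits, pvSafeUpper, pvSafeLower)
    else (([] : List Char), ([] : List Char), ([] : List Char))
  let cs := [(digf, pools.1), (upperf, pools.2.1), (lowerf, pools.2.2)].foldl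
      (fun acc fp => if fp.1 == true then acc ++ fp.2 else acc) cs
  String.ofList cs

-- ===== PRECONDITION & SPEC =====
def Spec_char_getting (chars : String) (digf : Bool) (upperf : Bool) (lowerf : Bool) (symbf : Bool) (nonesf : Bool) (out : String) : Prop := out = char_getting_alt chars digf upperf lowerf symbf nonesf
instance (chars : String) (digf : Bool) (upperf : Bool) (lowerf : Bool) (symbf : Bool) (nonesf : Bool) (out : String) : Decidable (Spec_char_getting chars digf upperf lowerf symbf nonesf out) := by unfold Spec_char_getting; infer_instance

-- ===== CLAIM (what is proved, stated in full; the proofs are below) =====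
def Claim_equal_char_getting : Prop := ∀ (chars : String) (digf : Bool) (upperf : Bool) (lowerf : Bool) (symbf : Bool) (nonesf : Bool), Dom_char_getting chars digf upperf lowerf symbf nonesf → Spec_char_getting chars digf upperf lowerf symbf nonesf (char_getting chars digf upperf lowerf symbf nonesf)

-- ===== LEMMAS AND PROOFS =====

-- ===== VERDICT (by name: the statement is the Claim_ definition above) =====
lemma foldl_filter_append (p : Char → Bool) (l : List Char) (cs : List Char) :
    l.foldl (fun acc c => if p c then acc ++ [c] else acc) cs = cs ++ l.filter p := by
  induction l generalizing cs with
  | nil => simp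
  | cons a t ih =>
    by_cases h : p a = true <;> simp [List.foldl, h, ih, List.filter]

lemma filt_digits : pvDigits.filter (fun c => !("10".toList.contains c)) = pvSafeDigits := by decide
lemma filt_upper : pvUppercase.filter (fun c => !(pvNones.contains c)) = pvSafeUpper := by decide
lemma filt_lower : pvLowercase.filter (fun c => !(pvNones.contains c)) = pvSafeLower := by decide

theorem char_getting_spec : Claim_equal_char_getting := by
  intro chars digf upperf lowerf symbf nonesf _
  unfold Spec_char_getting char_getting char_getting_alt
  cases digf <;> cases upperf <;> cases lowerf <;> cases symbf <;> cases nonesf <;>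
    simp only [foldl_filter_append, filt_digits, filt_upper, filt_lower] <;>
    simp [List.append_assoc]
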